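-- pv_equiv track=rewrite | github.com/P1sec/pycrate | pycrate_csn1/trans.py | _build_dict_from_alt
-- ===== SOURCE A (Python) =====
-- def _build_dict_from_alt(selec):
--     d = {}
--     for (k, l) in selec:
--         # get the list of keys, enventually truncated to the length of k
--         if d and not all([_check_keys(k, key) for key in d.keys() if len(key) > 0]):
--             raise(CSN1Err('multiple alternatives start with the same value, {0!r}'\
--                   .format(k)))
--         d[k] = l
--     return d
--
-- def _check_keys(k1, k2):
--     # ensure two CSN1Alt keys are not colliding
--     if k1 == k2[:len(k1)] or k1[:len(k2)] == k2:
--         return False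
--     else:
--         return True
-- ===== SOURCE B (Python) =====
-- class CSN1Err(Exception):
--     pass
--
-- def _build_dict_from_alt(selec):
--     # Build the dict in one shot, then detect prefix collisions with a single
--     # sort + adjacent-pair scan (a key p collides with a longer key s iff p is
--     # immediately before some s it prefixes in sorted order).
--     d = dict(selec)
--     ks = sorted(k for k in d if k)
--     for a, b in zip(ks, ks[1:]):
--         if b.startswith(a):
--             raise CSN1Err('multiple alternatives start with the same value, {0!r}'.format(b))
--     return d
-- ===== Notes on version B (the rewrite author's own statement) =====
-- stated objective: faster
-- what changed: Instead of re-checking the new key against every previously inserted key at each step (O(n^2) prefix tests), B builds the dict in one shot and detects prefix collisions with a single sort of the non-empty keys plus one adjacent-pair startswith scan.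
import Mathlib
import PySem

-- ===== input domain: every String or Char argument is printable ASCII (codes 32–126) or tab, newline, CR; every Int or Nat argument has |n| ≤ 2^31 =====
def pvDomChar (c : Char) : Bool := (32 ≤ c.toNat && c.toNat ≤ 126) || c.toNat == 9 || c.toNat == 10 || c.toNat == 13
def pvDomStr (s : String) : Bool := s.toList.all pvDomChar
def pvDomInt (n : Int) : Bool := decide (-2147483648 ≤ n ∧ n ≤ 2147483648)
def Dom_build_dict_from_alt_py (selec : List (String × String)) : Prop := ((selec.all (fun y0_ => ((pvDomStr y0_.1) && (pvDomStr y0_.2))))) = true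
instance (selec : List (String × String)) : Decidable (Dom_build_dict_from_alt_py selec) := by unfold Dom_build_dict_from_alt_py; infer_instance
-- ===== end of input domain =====

-- B replaces A's per-insertion scan over all previous keys by one dict build plus a
-- sort-and-adjacent-scan collision check over the non-empty keys.

-- ===== PORT A =====
-- _check_keys(k1, k2)
def check_keys_py (k1 k2 : String) : Bool :=
  if k1 == PySem.Str.slice k2 none (some (PySem.Str.len k1 : Int)) ||
     PySem.Str.slice k1 none (some (PySem.Str.len k2 : Int)) == k2 then
    false
  else
    true

-- the loop of _build_dict_from_alt; the 'raise' branch stops and returns the current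
-- dict (those inputs are excluded by Pre_ below, so nothing is claimed about them)
def goA : List (String × String) → PySem.Dict String String → PySem.Dict String String
  | [], d => d
  | (k, l) :: rest, d =>
      if d.size ≠ 0 ∧
         ¬ (((d.keys.filter (fun key => 0 < PySem.Str.len key)).map
              (fun key => check_keys_py k key)).all (fun b => b)) = true then
        d  -- raise CSN1Err
      else
        goA rest (d.insert k l)

def build_dict_from_alt_py (selec : List (String × String)) : List (String × String) :=
  (goA selec PySem.Dict.empty).items

-- ===== PORT B =====
-- the adjacent-pair scan over the sorted non-empty keys; 'raise' is the false branch
def adjScanOk : List String → Bool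
  | a :: b :: t => !(PySem.Str.startswith b a) && adjScanOk (b :: t)
  | _ => true

def build_dict_from_alt_py_alt (selec : List (String × String)) : List (String × String) :=
  let d := PySem.Dict.ofList selec
  let ks := PySem.List.sorted (d.keys.filter (fun k => k ≠ "")) (fun x => x) false
  if adjScanOk ks then d.items else []  -- raise CSN1Err

-- ===== PRECONDITION & SPEC =====
-- Pre_ excludes exactly the inputs on which A raises CSN1Err: a key preceded by a
-- non-empty key that is a prefix of it or of which it is a prefix.
def Pre_build_dict_from_alt_py (selec : List (String × String)) : Prop :=
  (selec.map Prod.fst).Pairwise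
    (fun a b => a = "" ∨ (¬ a.toList <+: b.toList ∧ ¬ b.toList <+: a.toList))

instance (selec : List (String × String)) : Decidable (Pre_build_dict_from_alt_py selec) := by
  unfold Pre_build_dict_from_alt_py; infer_instance

def pvWitness_build_dict_from_alt_py : (List (String × String)) :=
  [("0", "x"), ("10", "y"), ("11", "z")]

def Spec_build_dict_from_alt_py (selec : List (String × String)) (out : List (String × String)) : Prop := out = build_dict_from_alt_py_alt selec
instance (selec : List (String × String)) (out : List (String × String)) : Decidable (Spec_build_dict_from_alt_py selec out) := by unfold Spec_build_dict_from_alt_py; infer_instance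

-- ===== CLAIM (what is proved, stated in full; the proofs are below) =====
def Claim_equal_build_dict_from_alt_py : Prop := ∀ (selec : List (String × String)), Dom_build_dict_from_alt_py selec → Pre_build_dict_from_alt_py selec → Spec_build_dict_from_alt_py selec (build_dict_from_alt_py selec)

-- ===== LEMMAS AND PROOFS =====

theorem str_eq_iff_toList (a b : String) : (a == b) = true ↔ a.toList = b.toList := by
  constructor
  · intro h; exact congrArg String.toList (eq_of_beq h)
  · intro h; exact beq_iff_eq.mpr (String.toList_injective h)

theorem slice_len_toList (a b : String) :
    (PySem.Str.slice b none (some (PySem.Str.len a))).toList = b.toList.take a.toList.length := by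
  rw [PySem.Str.toList_slice, PySem.Str.len_eq, PySem.Chars.slice_eq_listSlice,
    PySem.List.slice_to_natCast]

-- _check_keys k1 k2 is True exactly when k1 and k2 are mutually prefix-free
theorem check_keys_py_iff (k1 k2 : String) :
    check_keys_py k1 k2 = true ↔ ¬ k1.toList <+: k2.toList ∧ ¬ k2.toList <+: k1.toList := by
  have h1 : (k1 == PySem.Str.slice k2 none (some (PySem.Str.len k1))) = true
      ↔ k1.toList <+: k2.toList := by
    rw [str_eq_iff_toList, slice_len_toList, List.prefix_iff_eq_take]
  have h2 : (PySem.Str.slice k1 none (some (PySem.Str.len k2)) == k2) = true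
      ↔ k2.toList <+: k1.toList := by
    rw [str_eq_iff_toList, slice_len_toList, List.prefix_iff_eq_take]
    constructor
    · intro h; exact h.symm
    · intro h; exact h.symm
  unfold check_keys_py
  split
  · rename_i h
    rw [Bool.or_eq_true] at h
    refine iff_of_false (by simp) ?_
    intro hc
    rcases h with h | h
    · exact hc.1 (h1.mp h)
    · exact hc.2 (h2.mp h)
  · rename_i h
    rw [Bool.or_eq_true] at h
    push Not at h
    exact iff_of_true rfl ⟨fun hc => h.1 (h1.mpr hc), fun hc => h.2 (h2.mpr hc)⟩

-- under Pre_, A's loop never takes the raise branch: it is a plain insert fold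
theorem goA_eq_foldl :
    ∀ (rest : List (String × String)) (d : PySem.Dict String String),
      (∀ key ∈ d.keys, key ≠ "" → ∀ p ∈ rest,
        ¬ key.toList <+: p.1.toList ∧ ¬ p.1.toList <+: key.toList) →
      (rest.map Prod.fst).Pairwise
        (fun a b => a = "" ∨ (¬ a.toList <+: b.toList ∧ ¬ b.toList <+: a.toList)) →
      goA rest d = rest.foldl (fun d p => d.insert p.1 p.2) d := by
  intro rest
  induction rest with
  | nil => intro d _ _; rfl
  | cons p rest ih =>
    obtain ⟨k, l⟩ := p
    intro d hd hpw
    rw [List.map_cons, List.pairwise_cons] at hpw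
    obtain ⟨hk, hpw'⟩ := hpw
    have hcheck : (((d.keys.filter (fun key => 0 < PySem.Str.len key)).map
        (fun key => check_keys_py k key)).all (fun b => b)) = true := by
      rw [List.all_eq_true]
      intro b hb
      rw [List.mem_map] at hb
      obtain ⟨key, hkey, rfl⟩ := hb
      rw [List.mem_filter] at hkey
      obtain ⟨hmem, hpos⟩ := hkey
      have hne : key ≠ "" := by
        intro h; subst h; simp [PySem.Str.len_eq] at hpos
      have hpf := hd key hmem hne (k, l) List.mem_cons_self
      exact (check_keys_py_iff k key).mpr ⟨hpf.2, hpf.1⟩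
    show (if _ ∧ _ then d else goA rest (d.insert k l)) = _
    rw [if_neg (by intro hc; exact hc.2 hcheck), List.foldl_cons]
    apply ih
    · intro key hkey hne q hq
      rw [PySem.Dict.mem_keys_insert] at hkey
      rcases hkey with rfl | hkey
      · rcases hk q.1 (List.mem_map_of_mem hq) with h | h
        · exact absurd h hne
        · exact h
      · exact hd key hkey hne q (List.mem_cons_of_mem _ hq)
    · exact hpw'

-- a Pairwise no-startswith list passes B's adjacent scan
theorem adjScanOk_of_pairwise :
    ∀ (l : List String), l.Pairwise (fun a b => PySem.Str.startswith b a = false) →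
      adjScanOk l = true := by
  intro l
  induction l with
  | nil => intro _; rfl
  | cons a t ih =>
    intro hl
    rw [List.pairwise_cons] at hl
    cases t with
    | nil => rfl
    | cons b t' =>
      have h1 : PySem.Str.startswith b a = false := hl.1 b List.mem_cons_self
      rw [PySem.Str.startswith] at h1
      simp [adjScanOk, h1, ih hl.2]

theorem mem_keys_ofList (ps : List (String × String)) (k : String)
    (h : k ∈ (PySem.Dict.ofList ps).keys) : k ∈ ps.map Prod.fst := by
  have he : (PySem.Dict.ofList ps).keys
      = PySem.Set.update (PySem.Dict.empty (κ := String) (ν := String)).keys (ps.map Prod.fst) :=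
    PySem.Dict.keys_foldl_insert_key ps Prod.fst (fun _ p => p.2) PySem.Dict.empty
  rw [he, PySem.Dict.keys_empty, PySem.Set.mem_update] at h
  rcases h with h | h
  · exact absurd h List.not_mem_nil
  · exact h

-- under Pre_, B's collision scan passes, so B returns the dict's items
theorem alt_eq_items (selec : List (String × String))
    (hpre : Pre_build_dict_from_alt_py selec) :
    build_dict_from_alt_py_alt selec = (PySem.Dict.ofList selec).items := by
  unfold build_dict_from_alt_py_alt
  have hnd : ((PySem.Dict.ofList selec).keys.filter (fun k => k ≠ "")).Nodup :=
    (PySem.Dict.nodup_keys_ofList selec).filter _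
  have hsnd : (PySem.List.sorted ((PySem.Dict.ofList selec).keys.filter (fun k => k ≠ ""))
      (fun x => x) false).Nodup :=
    ((PySem.List.sorted_perm _ _ _).nodup_iff).mpr hnd
  have hmem : ∀ x ∈ PySem.List.sorted ((PySem.Dict.ofList selec).keys.filter (fun k => k ≠ ""))
      (fun x => x) false, x ∈ selec.map Prod.fst ∧ x ≠ "" := by
    intro x hx
    rw [PySem.List.mem_sorted, List.mem_filter] at hx
    exact ⟨mem_keys_ofList selec x hx.1, by simpa using hx.2⟩
  have hsym : ∀ a ∈ selec.map Prod.fst, ∀ b ∈ selec.map Prod.fst, a ≠ b →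
      a = "" ∨ b = "" ∨ (¬ a.toList <+: b.toList ∧ ¬ b.toList <+: a.toList) := by
    have hR : (selec.map Prod.fst).Pairwise
        (fun a b => a = "" ∨ b = "" ∨ (¬ a.toList <+: b.toList ∧ ¬ b.toList <+: a.toList)) := by
      refine hpre.imp ?_
      intro a b h
      rcases h with h | h
      · exact Or.inl h
      · exact Or.inr (Or.inr h)
    have hS : Symmetric (fun a b : String =>
        a = "" ∨ b = "" ∨ (¬ a.toList <+: b.toList ∧ ¬ b.toList <+: a.toList)) := by
      intro a b h
      rcases h with h | h | h
      · exact Or.inr (Or.inl h)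
      · exact Or.inl h
      · exact Or.inr (Or.inr ⟨h.2, h.1⟩)
    intro a ha b hb hne
    exact hR.forall hS ha hb hne
  have hscan : adjScanOk (PySem.List.sorted ((PySem.Dict.ofList selec).keys.filter
      (fun k => k ≠ "")) (fun x => x) false) = true := by
    apply adjScanOk_of_pairwise
    refine hsnd.imp_of_mem ?_
    intro a b ha hb hne
    obtain ⟨ha', hae⟩ := hmem a ha
    obtain ⟨hb', hbe⟩ := hmem b hb
    rcases hsym a ha' b hb' hne with h | h | h
    · exact absurd h hae
    · exact absurd h hbe
    · rw [PySem.Str.startswith, ← Bool.not_eq_true]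
      intro hc
      exact h.1 ((PySem.Chars.startswith_iff _ _).mp hc)
  rw [if_pos hscan]

-- ===== VERDICT (by name: the statement is the Claim_ definition above) =====
theorem build_dict_from_alt_py_spec : Claim_equal_build_dict_from_alt_py := by
  intro selec _hdom hpre
  unfold Spec_build_dict_from_alt_py
  rw [alt_eq_items selec hpre]
  unfold build_dict_from_alt_py
  rw [goA_eq_foldl selec PySem.Dict.empty (by simp [PySem.Dict.keys_empty]) hpre]
  rfl
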